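-- pv_equiv track=rewrite | github.com/gnawre31/CCPS109-109-Python-Problems | labs109.py | brangelina
-- ===== SOURCE A (Python) =====
-- def brangelina(first, second):
--     firstv, secondv, temp = [], [], []
--     for ind, letter in enumerate(first):
--         if letter in ('a', 'e', 'i', 'o', 'u'):
--             temp.append(ind)
--         else:
--             if len(temp) > 0:
--                 firstv.append(temp)
--                 temp = []
--     if len(temp) > 0:
--                 firstv.append(temp)
--                 temp = []
--     if len(firstv) > 2:
--         firstv = firstv[:-1]
--         first = first[:int(firstv[-1][0])]
--     else:
--         first = first[:int(firstv[0][0])]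
--
--     while second[0] not in ('a', 'e', 'i', 'o', 'u'):
--         second = second[1:]
--
--     return first + second
-- ===== SOURCE B (Python) =====
-- def brangelina(first, second):
--     V = 'aeiou'
--
--     def runs(s):
--         # tokenize s into maximal same-class runs: list of (is_vowel_run, chunk)
--         out, i = [], 0
--         while i < len(s):
--             v = s[i] in V
--             j = i
--             while j < len(s) and (s[j] in V) == v:
--                 j += 1
--             out.append((v, s[i:j]))
--             i = j
--         return out
--
--     fr = runs(first)
--     vpos = [p for p, (v, _) in enumerate(fr) if v]
--     keep = vpos[-2] if len(vpos) > 2 else vpos[0]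
--     sr = runs(second)
--     if not sr[0][0]:
--         sr = sr[1:]
--     return ''.join(g for _, g in fr[:keep]) + ''.join(g for _, g in sr)
-- ===== Notes on version B (the rewrite author's own statement) =====
-- stated objective: alternative
-- what changed: A tracks per-character vowel indices in nested lists (temp/firstv) and cuts/strips by character index, with a char-by-char while loop on second; B instead run-length tokenizes both names into maximal vowel/consonant runs, picks which run tokens to keep (second-to-last or first vowel token for first, dropping second's leading consonant token), and rebuilds the result by joining whole tokens - no character indices or slicing.
import Mathlib
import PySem

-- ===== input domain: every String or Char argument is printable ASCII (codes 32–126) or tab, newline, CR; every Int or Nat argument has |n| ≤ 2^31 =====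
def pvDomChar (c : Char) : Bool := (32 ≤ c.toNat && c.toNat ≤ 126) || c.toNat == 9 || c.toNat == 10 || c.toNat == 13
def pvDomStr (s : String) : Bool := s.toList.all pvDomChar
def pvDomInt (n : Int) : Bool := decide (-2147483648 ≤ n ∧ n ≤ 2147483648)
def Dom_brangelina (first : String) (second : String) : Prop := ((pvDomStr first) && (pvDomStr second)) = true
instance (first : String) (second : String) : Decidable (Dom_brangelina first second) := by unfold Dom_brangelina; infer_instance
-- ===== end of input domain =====

-- B replaces A's per-character vowel-index bookkeeping with a run-length tokenizer:
-- it splits both names into maximal vowel/consonant runs and rebuilds the answer by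
-- joining whole run tokens (objective: alternative decomposition; return value only).

-- ===== PORT A =====

def pvIsV (c : Char) : Bool :=
  c == 'a' || c == 'e' || c == 'i' || c == 'o' || c == 'u'

-- the body of A's for-loop over enumerate(first): state = (firstv, temp)
def pvStepA (s : List (List Int) × List Int) (p : Int × Char) : List (List Int) × List Int :=
  if pvIsV p.2 then (s.1, s.2 ++ [p.1])
  else if s.2.length > 0 then (s.1 ++ [s.2], []) else (s.1, s.2)

-- A's 'while second[0] not in vowels: second = second[1:]' loop;
-- on the empty list Python raises IndexError — those inputs are excluded by Pre_
def pvDropConsA : List Char → List Char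
  | [] => []
  | c :: r => if pvIsV c then c :: r else pvDropConsA r

def brangelina (first : String) (second : String) : String :=
  let fs := first.toList
  let st := (PySem.List.enumerate fs).foldl pvStepA ([], [])
  let firstv := if st.2.length > 0 then st.1 ++ [st.2] else st.1
  let cut? : Option Int :=
    if firstv.length > 2 then
      let firstv' := PySem.List.slice firstv none (some (-1))          -- firstv[:-1]
      (PySem.List.pyGet? firstv' (-1)).bind (fun g => PySem.List.pyGet? g 0)  -- firstv[-1][0]
    else
      (PySem.List.pyGet? firstv 0).bind (fun g => PySem.List.pyGet? g 0)      -- firstv[0][0]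
  match cut? with
  | none => ""   -- Python raises IndexError here (no vowel in first); excluded by Pre_
  | some k => String.ofList (PySem.List.slice fs none (some k) ++ pvDropConsA second.toList)

-- ===== PORT B =====

-- B's `runs` tokenizer: the outer while loop becomes recursion on the remaining
-- suffix, the inner `while j < len(s) and (s[j] in V) == v` scan is takeWhile/dropWhile
def pvRuns : List Char → List (Bool × List Char)
  | [] => []
  | c :: r =>
      (pvIsV c, (c :: r).takeWhile (fun x => pvIsV x == pvIsV c)) ::
        pvRuns ((c :: r).dropWhile (fun x => pvIsV x == pvIsV c))
termination_by l => l.length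
decreasing_by
  simp only [List.dropWhile_cons, beq_self_eq_true, if_true, List.length_cons]
  exact Nat.lt_succ_of_le (List.length_dropWhile_le _ _)

def brangelina_alt (first : String) (second : String) : String :=
  let fr := pvRuns first.toList
  -- vpos = [p for p, (v, _) in enumerate(fr) if v]
  let vpos := ((PySem.List.enumerate fr).filter (fun q => q.2.1)).map (fun q => q.1)
  -- keep = vpos[-2] if len(vpos) > 2 else vpos[0]   (IndexError on empty vpos)
  let keep? : Option Int :=
    if vpos.length > 2 then PySem.List.pyGet? vpos (-2) else PySem.List.pyGet? vpos 0
  -- sr = runs(second); if not sr[0][0]: sr = sr[1:]   (sr[0] raises IndexError on "")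
  let sr? : Option (List (Bool × List Char)) :=
    match pvRuns second.toList with
    | [] => none
    | t :: rest => some (if t.1 then t :: rest else rest)
  match keep?, sr? with
  | some k, some sr =>
      String.ofList ((((PySem.List.slice fr none (some k)).map (fun q => q.2)).flatten)
        ++ ((sr.map (fun q => q.2)).flatten))
  | _, _ => ""   -- IndexError in Python; excluded by Pre_

-- ===== PRECONDITION & SPEC =====
-- Pre_ excludes exactly the inputs where A raises IndexError: a `first` with no
-- (lowercase) vowel, or a `second` with no vowel.
def Pre_brangelina (first : String) (second : String) : Prop :=
  first.toList.any pvIsV = true ∧ second.toList.any pvIsV = true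
instance (first : String) (second : String) : Decidable (Pre_brangelina first second) := by
  unfold Pre_brangelina; infer_instance

def pvWitness_brangelina : String × String := ("oboe", "brand")

def Spec_brangelina (first : String) (second : String) (out : String) : Prop := out = brangelina_alt first second
instance (first : String) (second : String) (out : String) : Decidable (Spec_brangelina first second out) := by unfold Spec_brangelina; infer_instance

-- ===== CLAIM (what is proved, stated in full; the proofs are below) =====
def Claim_equal_brangelina : Prop := ∀ (first : String) (second : String), Dom_brangelina first second → Pre_brangelina first second → Spec_brangelina first second (brangelina first second)

-- ===== LEMMAS AND PROOFS =====

-- the list of start indices of vowel runs, scanning with a "previous char was a vowel" flag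
def pvStarts (i : Int) (prev : Bool) : List Char → List Int
  | [] => []
  | c :: r => if pvIsV c && !prev then i :: pvStarts (i + 1) (pvIsV c) r
              else pvStarts (i + 1) (pvIsV c) r

def pvHd (g : List Int) : Int := g.headD 0

def pvFin (s : List (List Int) × List Int) : List (List Int) :=
  if s.2.length > 0 then s.1 ++ [s.2] else s.1

-- vowel-run start offsets read off a run list
def pvVst (i : Int) : List (Bool × List Char) → List Int
  | [] => []
  | (b, g) :: R => if b then i :: pvVst (i + g.length) R else pvVst (i + g.length) R

-- (token index, char offset) of each vowel run
def pvZ (p i : Int) : List (Bool × List Char) → List (Int × Int)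
  | [] => []
  | (b, g) :: R => if b then (p, i) :: pvZ (p + 1) (i + g.length) R
                   else pvZ (p + 1) (i + g.length) R

theorem pvFin_nil (fv : List (List Int)) : pvFin (fv, []) = fv := by simp [pvFin]

theorem pvFin_cons (fv : List (List Int)) (x : Int) (xs : List Int) :
    pvFin (fv, x :: xs) = fv ++ [x :: xs] := by simp [pvFin]

-- A's loop: the heads of the accumulated groups are exactly the vowel-run starts,
-- and all groups stay nonempty.
theorem pvA1 (l : List Char) (i : Int) (fv : List (List Int)) (t : List Int)
    (h : ∀ g ∈ pvFin (fv, t), g ≠ []) :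
    (pvFin ((PySem.List.enumerate l i).foldl pvStepA (fv, t))).map pvHd
      = (pvFin (fv, t)).map pvHd ++ pvStarts i (!t.isEmpty) l
    ∧ ∀ g ∈ pvFin ((PySem.List.enumerate l i).foldl pvStepA (fv, t)), g ≠ [] := by
  induction l generalizing i fv t with
  | nil =>
    refine ⟨?_, h⟩
    simp [PySem.List.enumerate_nil, pvStarts]
  | cons c r ih =>
    rw [PySem.List.enumerate_cons, List.foldl_cons]
    by_cases hc : pvIsV c
    · cases t with
      | nil =>
        have hstep : pvStepA (fv, []) (i, c) = (fv, [i]) := by simp [pvStepA, hc]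
        rw [hstep]
        have h' : ∀ g ∈ pvFin (fv, [i]), g ≠ [] := by
          intro g hg
          rw [pvFin_cons] at hg
          rcases List.mem_append.1 hg with hg | hg
          · exact h g (by rw [pvFin_nil]; exact hg)
          · simp at hg; subst hg; simp
        obtain ⟨ih1, ih2⟩ := ih (i + 1) fv [i] h'
        refine ⟨?_, ih2⟩
        rw [ih1, pvFin_cons, pvFin_nil, pvStarts]
        simp [hc, pvHd]
      | cons x xs =>
        have hstep : pvStepA (fv, x :: xs) (i, c) = (fv, (x :: xs) ++ [i]) := by
          simp [pvStepA, hc]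
        rw [hstep]
        have h' : ∀ g ∈ pvFin (fv, (x :: xs) ++ [i]), g ≠ [] := by
          intro g hg
          rw [List.cons_append, pvFin_cons] at hg
          rcases List.mem_append.1 hg with hg | hg
          · exact h g (by rw [pvFin_cons]; exact List.mem_append_left _ hg)
          · simp at hg; subst hg; simp
        obtain ⟨ih1, ih2⟩ := ih (i + 1) fv ((x :: xs) ++ [i]) h'
        refine ⟨?_, ih2⟩
        rw [ih1, List.cons_append, pvFin_cons, pvFin_cons, pvStarts]
        simp [hc, pvHd]
    · cases t with
      | nil =>
        have hstep : pvStepA (fv, ([] : List Int)) (i, c) = (fv, []) := by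
          simp [pvStepA, hc]
        rw [hstep]
        obtain ⟨ih1, ih2⟩ := ih (i + 1) fv [] h
        refine ⟨?_, ih2⟩
        rw [ih1, pvStarts]
        simp [hc]
      | cons x xs =>
        have hstep : pvStepA (fv, x :: xs) (i, c) = (fv ++ [x :: xs], []) := by
          simp [pvStepA, hc]
        rw [hstep]
        have h' : ∀ g ∈ pvFin (fv ++ [x :: xs], ([] : List Int)), g ≠ [] := by
          intro g hg
          rw [pvFin_nil] at hg
          exact h g (by rw [pvFin_cons]; exact hg)
        obtain ⟨ih1, ih2⟩ := ih (i + 1) (fv ++ [x :: xs]) [] h'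
        refine ⟨?_, ih2⟩
        rw [ih1, pvFin_nil, pvFin_cons, pvStarts]
        simp [hc]

-- a vowel exists iff the start list (scanned with prev = false) is nonempty
theorem pvStarts_ne_nil (l : List Char) (i : Int) (h : l.any pvIsV = true) :
    pvStarts i false l ≠ [] := by
  induction l generalizing i with
  | nil => simp at h
  | cons c r ih =>
    rw [pvStarts]
    by_cases hc : pvIsV c
    · simp [hc]
    · simp only [List.any_cons, hc, Bool.false_or] at h
      simp [hc]
      exact ih (i+1) h

theorem pvGet0 {α : Type} (g : List α) : PySem.List.pyGet? g 0 = g.head? := by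
  cases g <;> simp [PySem.List.pyGet?, PySem.List.pyIdx?]

-- the two cut computations agree
theorem pvCut (G : List (List Int)) (hne : ∀ g ∈ G, g ≠ []) (hG : G ≠ []) :
    (if G.length > 2 then
        (PySem.List.pyGet? (PySem.List.slice G none (some (-1))) (-1)).bind
          (fun g => PySem.List.pyGet? g 0)
      else (PySem.List.pyGet? G 0).bind (fun g => PySem.List.pyGet? g 0))
      = (if (G.map pvHd).length > 2 then PySem.List.pyGet? (G.map pvHd) (-2)
         else PySem.List.pyGet? (G.map pvHd) 0) := by
  rw [List.length_map]
  by_cases h2 : G.length > 2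
  · rw [if_pos h2, if_pos h2, PySem.List.slice_to_neg_one]
    rw [PySem.List.pyGet?_neg_ofNat G.dropLast 1 (by omega)
      (by rw [List.length_dropLast]; omega)]
    rw [PySem.List.pyGet?_neg_ofNat (G.map pvHd) 2 (by omega)
      (by rw [List.length_map]; omega)]
    have hlt : G.dropLast.length - 1 < G.dropLast.length := by
      rw [List.length_dropLast]; omega
    rw [List.getElem?_eq_getElem hlt]
    have hidx : G.dropLast.length - 1 = G.length - 2 := by
      rw [List.length_dropLast]; omega
    have hlt2 : G.length - 2 < G.length := by omega
    have hg : G.dropLast[G.dropLast.length - 1] = G[G.length - 2] := by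
      rw [List.getElem_dropLast]
      exact getElem_congr rfl hidx (by rw [List.length_dropLast]; omega)
    rw [hg, Option.bind_some, pvGet0]
    have hmlt : (G.map pvHd).length - 2 < (G.map pvHd).length := by
      rw [List.length_map]; omega
    rw [List.getElem?_eq_getElem hmlt]
    have : (G.map pvHd)[(G.map pvHd).length - 2] = pvHd G[G.length - 2] := by
      rw [List.getElem_map]
      exact congrArg pvHd (getElem_congr rfl (by rw [List.length_map]) (by rw [List.length_map]; omega))
    rw [this]
    have hne2 : G[G.length - 2] ≠ [] := hne _ (List.getElem_mem hlt2)
    cases hG2 : G[G.length - 2] with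
    | nil => exact absurd hG2 hne2
    | cons y ys => simp [pvHd]
  · rw [if_neg h2, if_neg h2]
    cases G with
    | nil => exact absurd rfl hG
    | cons g gs =>
      have hne2 : g ≠ [] := hne g List.mem_cons_self
      cases g with
      | nil => exact absurd rfl hne2
      | cons y ys => simp [pvGet0, pvHd]

theorem pvRuns_flatten (l : List Char) : ((pvRuns l).map (fun q => q.2)).flatten = l := by
  induction l using pvRuns.induct with
  | case1 => simp [pvRuns]
  | case2 c r ih =>
    rw [pvRuns]
    simp only [List.map_cons, List.flatten_cons, ih]
    exact List.takeWhile_append_dropWhile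

theorem pvStarts_vowel_run (g : List Char) (rest : List Char) (i : Int)
    (h : ∀ c ∈ g, pvIsV c = true) :
    pvStarts i true (g ++ rest) = pvStarts (i + g.length) true rest := by
  induction g generalizing i with
  | nil => simp
  | cons c g' ih =>
    have hc := h c List.mem_cons_self
    rw [List.cons_append, pvStarts, if_neg (by simp [hc]), hc]
    rw [ih (i+1) (fun x hx => h x (List.mem_cons_of_mem _ hx))]
    congr 1
    simp [List.length_cons]; ring

theorem pvStarts_cons_run0 (g : List Char) (rest : List Char) (i : Int)
    (h : ∀ c ∈ g, pvIsV c = false) :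
    pvStarts i false (g ++ rest) = pvStarts (i + g.length) false rest := by
  induction g generalizing i with
  | nil => simp
  | cons c g' ih =>
    have hc := h c List.mem_cons_self
    rw [List.cons_append, pvStarts, if_neg (by simp [hc]), hc]
    rw [ih (i+1) (fun x hx => h x (List.mem_cons_of_mem _ hx))]
    congr 1
    simp [List.length_cons]; ring

theorem pvStarts_cons_run (g : List Char) (rest : List Char) (i : Int) (prev : Bool)
    (hne : g ≠ []) (h : ∀ c ∈ g, pvIsV c = false) :
    pvStarts i prev (g ++ rest) = pvStarts (i + g.length) false rest := by
  cases g with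
  | nil => exact absurd rfl hne
  | cons c g' =>
    have hc := h c List.mem_cons_self
    rw [List.cons_append, pvStarts, if_neg (by simp [hc]), hc]
    rw [pvStarts_cons_run0 g' rest (i+1) (fun x hx => h x (List.mem_cons_of_mem _ hx))]
    congr 1
    simp [List.length_cons]; ring

theorem pvStarts_prev_irrel (l : List Char) (i : Int) (p1 p2 : Bool)
    (h : ∀ c, l.head? = some c → pvIsV c = false) :
    pvStarts i p1 l = pvStarts i p2 l := by
  cases l with
  | nil => rfl
  | cons c r =>
    have hc := h c rfl
    rw [pvStarts, pvStarts, if_neg (by simp [hc]), if_neg (by simp [hc])]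

theorem pvStarts_eq_vst (l : List Char) (i : Int) :
    pvStarts i false l = pvVst i (pvRuns l) := by
  induction l using pvRuns.induct generalizing i with
  | case1 => simp [pvRuns, pvStarts, pvVst]
  | case2 c r ih =>
    rw [pvRuns, pvVst]
    have hsplit : (c :: r).takeWhile (fun x => pvIsV x == pvIsV c)
        ++ (c :: r).dropWhile (fun x => pvIsV x == pvIsV c) = c :: r :=
      List.takeWhile_append_dropWhile
    have hall : ∀ x ∈ (c :: r).takeWhile (fun x => pvIsV x == pvIsV c), pvIsV x = pvIsV c := by
      intro x hx
      have := List.mem_takeWhile_imp hx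
      simpa using this
    have hrest : ∀ x, ((c :: r).dropWhile (fun x => pvIsV x == pvIsV c)).head? = some x →
        pvIsV x ≠ pvIsV c := by
      intro x hx
      have := List.head?_dropWhile_not (fun x => pvIsV x == pvIsV c) (c :: r)
      rw [hx] at this
      simpa using this
    have hne : (c :: r).takeWhile (fun x => pvIsV x == pvIsV c) ≠ [] := by
      rw [List.takeWhile_cons, if_pos (by simp)]
      simp
    by_cases hc : pvIsV c
    · rw [if_pos hc]
      have h1 : pvStarts i false (c :: r)
          = i :: pvStarts (i + ((c :: r).takeWhile (fun x => pvIsV x == pvIsV c)).length)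
              false ((c :: r).dropWhile (fun x => pvIsV x == pvIsV c)) := by
        conv_lhs => rw [← hsplit]
        cases htk : (c :: r).takeWhile (fun x => pvIsV x == pvIsV c) with
        | nil => exact absurd htk hne
        | cons x g' =>
          have hx : pvIsV x = true := by rw [hall x (htk ▸ List.mem_cons_self), hc]
          rw [List.cons_append, pvStarts, if_pos (by simp [hx]), hx]
          congr 1
          rw [pvStarts_vowel_run g' _ (i+1) (fun y hy => by
            rw [hall y (htk ▸ List.mem_cons_of_mem _ hy), hc])]
          rw [pvStarts_prev_irrel _ _ true false (fun y hy => by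
            have h2 := hrest y hy
            rw [hc] at h2
            exact Bool.eq_false_iff.mpr h2)]
          congr 1
          simp [List.length_cons]; ring
      rw [h1, ih]
    · rw [if_neg hc]
      have h1 : pvStarts i false (c :: r)
          = pvStarts (i + ((c :: r).takeWhile (fun x => pvIsV x == pvIsV c)).length)
              false ((c :: r).dropWhile (fun x => pvIsV x == pvIsV c)) := by
        conv_lhs => rw [← hsplit]
        exact pvStarts_cons_run _ _ i false hne (fun y hy => by rw [hall y hy]; exact Bool.eq_false_iff.mpr hc)
      rw [h1, ih]

theorem pvZ_snd (R : List (Bool × List Char)) (p i : Int) :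
    (pvZ p i R).map (fun q => q.2) = pvVst i R := by
  induction R generalizing p i with
  | nil => simp [pvZ, pvVst]
  | cons t R' ih =>
    obtain ⟨b, g⟩ := t
    rw [pvZ, pvVst]
    by_cases hb : b
    · simp [hb, ih]
    · simp [hb, ih]

theorem pvZ_fst (R : List (Bool × List Char)) (p i : Int) :
    ((PySem.List.enumerate R p).filter (fun q => q.2.1)).map (fun q => q.1)
      = (pvZ p i R).map (fun q => q.1) := by
  induction R generalizing p i with
  | nil => simp [PySem.List.enumerate_nil, pvZ]
  | cons t R' ih =>
    obtain ⟨b, g⟩ := t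
    rw [PySem.List.enumerate_cons, pvZ]
    by_cases hb : b
    · simp [hb, ih (p+1) (i + (g.length : Int))]
    · simp [hb, ih (p+1) (i + (g.length : Int))]

theorem pvZ_mem (R : List (Bool × List Char)) (p i : Int) (a b : Int)
    (h : (a, b) ∈ pvZ p i R) :
    ∃ n, n ≤ R.length ∧ a = p + n
      ∧ b = i + (((R.take n).map (fun q => q.2)).flatten.length : Int) := by
  induction R generalizing p i with
  | nil => simp [pvZ] at h
  | cons t R' ih =>
    obtain ⟨bb, g⟩ := t
    rw [pvZ] at h
    by_cases hb : bb
    · rw [if_pos hb] at h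
      rcases List.mem_cons.1 h with h | h
      · refine ⟨0, by simp, ?_, ?_⟩ <;> simp [Prod.ext_iff] at h <;> simp [h]
      · obtain ⟨n, hn, ha, hbv⟩ := ih (p+1) (i + g.length) h
        refine ⟨n+1, by simp; omega, by rw [ha]; push_cast; ring, ?_⟩
        rw [hbv, List.take_succ_cons]
        simp [List.length_append]
        ring
    · rw [if_neg hb] at h
      obtain ⟨n, hn, ha, hbv⟩ := ih (p+1) (i + g.length) h
      refine ⟨n+1, by simp; omega, by rw [ha]; push_cast; ring, ?_⟩
      rw [hbv, List.take_succ_cons]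
      simp [List.length_append]
      ring

theorem pvGetMap {α β : Type} (l : List α) (f : α → β) (k : Int) :
    PySem.List.pyGet? (l.map f) k = (PySem.List.pyGet? l k).map f := by
  simp [PySem.List.pyGet?, PySem.List.pyIdx?]

theorem pvFlatTake {α : Type} (R : List (Bool × List α)) (n : Nat) :
    ((R.take n).map (fun q => q.2)).flatten
      = ((R.map (fun q => q.2)).flatten).take (((R.take n).map (fun q => q.2)).flatten.length) := by
  have hsplit : R.map (fun q => q.2) = (R.take n).map (fun q => q.2) ++ (R.drop n).map (fun q => q.2) := by
    rw [← List.map_append, List.take_append_drop]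
  rw [hsplit, List.flatten_append, List.take_left]

theorem pvDropConsA_run (g rest : List Char) (h : ∀ c ∈ g, pvIsV c = false) :
    pvDropConsA (g ++ rest) = pvDropConsA rest := by
  induction g with
  | nil => simp
  | cons c g' ih =>
    rw [List.cons_append, pvDropConsA, if_neg (by simp [h c List.mem_cons_self])]
    exact ih (fun x hx => h x (List.mem_cons_of_mem _ hx))

-- B's token-drop on `second` computes A's while loop, given second contains a vowel
theorem pvSecond (ss : List Char) (h : ss.any pvIsV = true) :
    ∃ t rest', pvRuns ss = t :: rest'
      ∧ (((if t.1 then t :: rest' else rest').map (fun q => q.2)).flatten) = pvDropConsA ss := by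
  cases ss with
  | nil => simp at h
  | cons c r =>
    rw [pvRuns]
    refine ⟨_, _, rfl, ?_⟩
    by_cases hc : pvIsV c
    · rw [if_pos hc]
      have : ((pvRuns (c :: r)).map (fun q => q.2)).flatten = c :: r := pvRuns_flatten (c :: r)
      rw [pvRuns] at this
      rw [this]
      rw [pvDropConsA, if_pos hc]
    · rw [if_neg hc]
      have hflat : ((pvRuns ((c :: r).dropWhile (fun x => pvIsV x == pvIsV c))).map
          (fun q => q.2)).flatten = (c :: r).dropWhile (fun x => pvIsV x == pvIsV c) :=
        pvRuns_flatten _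
      rw [hflat]
      have hsplit : (c :: r).takeWhile (fun x => pvIsV x == pvIsV c)
          ++ (c :: r).dropWhile (fun x => pvIsV x == pvIsV c) = c :: r :=
        List.takeWhile_append_dropWhile
      conv_rhs => rw [← hsplit]
      rw [pvDropConsA_run _ _ (fun y hy => by
        have := List.mem_takeWhile_imp hy
        simp at this
        rw [this]; exact Bool.eq_false_iff.mpr hc)]
      cases hd : (c :: r).dropWhile (fun x => pvIsV x == pvIsV c) with
      | nil =>
        -- then c :: r is all consonants, contradicting h
        exfalso
        have hallc : ∀ y ∈ c :: r, pvIsV y = false := by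
          intro y hy
          rw [← hsplit] at hy
          rcases List.mem_append.1 hy with hy | hy
          · have := List.mem_takeWhile_imp hy
            simp at this
            rw [this]; exact Bool.eq_false_iff.mpr hc
          · rw [hd] at hy; simp at hy
        simp only [List.any_eq_true] at h
        obtain ⟨y, hy, hv⟩ := h
        rw [hallc y hy] at hv; simp at hv
      | cons d rest =>
        have hdv : pvIsV d = true := by
          have h0 := List.head?_dropWhile_not (fun x => pvIsV x == pvIsV c) (c :: r)
          rw [hd] at h0
          simp only [List.head?_cons] at h0
          rw [Bool.eq_false_iff.mpr hc] at h0
          simpa using h0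
        rw [pvDropConsA, if_pos hdv]

-- ===== VERDICT (by name: the statement is the Claim_ definition above) =====
theorem brangelina_spec : Claim_equal_brangelina := by
  intro first second _ hpre
  obtain ⟨h1, h2⟩ := hpre
  show brangelina first second = brangelina_alt first second
  -- A's grouping loop: heads of the groups = vowel-run starts, groups nonempty
  have hA := pvA1 first.toList 0 [] [] (by simp [pvFin])
  obtain ⟨hmap, hne⟩ := hA
  simp only [pvFin_nil, List.map_nil, List.nil_append, List.isEmpty_nil, Bool.not_true] at hmap
  -- names
  set S := pvStarts 0 false first.toList with hS
  set G := pvFin ((PySem.List.enumerate first.toList 0).foldl pvStepA ([], [])) with hG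
  set R := pvRuns first.toList with hR
  set Z := pvZ 0 0 R with hZ
  have hSne : S ≠ [] := pvStarts_ne_nil first.toList 0 h1
  have hGne : G ≠ [] := by
    intro hnil
    rw [hnil] at hmap
    exact hSne hmap.symm
  have hcut := pvCut G hne hGne
  rw [hmap] at hcut
  -- the chosen cut exists
  obtain ⟨k, hk⟩ : ∃ k, (if S.length > 2 then PySem.List.pyGet? S (-2)
      else PySem.List.pyGet? S 0) = some k := by
    by_cases hb2 : S.length > 2
    · rw [if_pos hb2, PySem.List.pyGet?_neg_ofNat S 2 (by omega) (by omega)]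
      exact ⟨_, List.getElem?_eq_getElem (by omega)⟩
    · rw [if_neg hb2, pvGet0]
      obtain ⟨a, l, hcons⟩ := List.exists_cons_of_ne_nil hSne
      rw [hcons]
      exact ⟨a, rfl⟩
  -- relate S and B's vpos through Z
  have hSZ : S = Z.map (fun q => q.2) := by rw [hS, hZ, pvStarts_eq_vst, pvZ_snd]
  have hlen1 : ((PySem.List.enumerate R 0).filter (fun q => q.2.1)).map (fun q => q.1)
      = Z.map (fun q => q.1) := pvZ_fst R 0 0
  have hlenS : S.length = Z.length := by rw [hSZ, List.length_map]
  -- pull the chosen element of Z out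
  obtain ⟨z, hz, hz2⟩ : ∃ z, (if S.length > 2 then PySem.List.pyGet? Z (-2)
      else PySem.List.pyGet? Z 0) = some z ∧ z.2 = k := by
    by_cases hb2 : S.length > 2
    · rw [if_pos hb2] at hk ⊢
      rw [hSZ, pvGetMap] at hk
      obtain ⟨z, hza, hzb⟩ := Option.map_eq_some_iff.1 hk
      exact ⟨z, hza, hzb⟩
    · rw [if_neg hb2] at hk ⊢
      rw [hSZ, pvGetMap] at hk
      obtain ⟨z, hza, hzb⟩ := Option.map_eq_some_iff.1 hk
      exact ⟨z, hza, hzb⟩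
  have hzmem : z ∈ Z := by
    by_cases hb2 : S.length > 2
    · rw [if_pos hb2] at hz; exact PySem.List.mem_of_pyGet?_eq_some _ hz
    · rw [if_neg hb2] at hz; exact PySem.List.mem_of_pyGet?_eq_some _ hz
  obtain ⟨n, hnle, hz1, hz2v⟩ := pvZ_mem R 0 0 z.1 z.2 (by rwa [← hZ])
  rw [zero_add] at hz1
  rw [zero_add] at hz2v
  -- B's keep? = some z.1
  have hB' : (if (((PySem.List.enumerate R 0).filter (fun q => q.2.1)).map (fun q => q.1)).length > 2
      then PySem.List.pyGet? (((PySem.List.enumerate R 0).filter (fun q => q.2.1)).map (fun q => q.1)) (-2)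
      else PySem.List.pyGet? (((PySem.List.enumerate R 0).filter (fun q => q.2.1)).map (fun q => q.1)) 0)
      = some z.1 := by
    rw [hlen1, List.length_map, ← hlenS]
    by_cases hb2 : S.length > 2
    · rw [if_pos hb2] at hz ⊢
      rw [pvGetMap, hz, Option.map_some]
    · rw [if_neg hb2] at hz ⊢
      rw [pvGetMap, hz, Option.map_some]
  -- A's cut? = some z.2
  have hA' : (if S.length > 2 then PySem.List.pyGet? S (-2)
      else PySem.List.pyGet? S 0) = some z.2 := by rw [hk, hz2]
  -- second side
  obtain ⟨t, rest', hsr, hjoin⟩ := pvSecond second.toList h2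
  -- assemble
  simp only [brangelina, brangelina_alt]
  rw [show ∀ s : List (List Int) × List Int,
        (if s.2.length > 0 then s.1 ++ [s.2] else s.1) = pvFin s from fun _ => rfl]
  rw [← hG, hcut, ← hR, hsr, hA', hB']
  show String.ofList (PySem.List.slice first.toList none (some z.2) ++ pvDropConsA second.toList)
    = String.ofList ((((PySem.List.slice R none (some z.1)).map (fun q => q.2)).flatten)
        ++ (((if t.1 then t :: rest' else rest').map (fun q => q.2)).flatten))
  rw [hjoin, hz2v, hz1, PySem.List.slice_to_natCast, PySem.List.slice_to_natCast]
  rw [pvFlatTake R n, pvRuns_flatten]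
  rw [List.length_take, ← List.take_take, List.take_length]
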